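-- pv_equiv track=rewrite | github.com/a2n-s/tetris-couleur | tetris_couleur.py | scoreRangeeCreature
-- ===== SOURCE A (Python) =====
-- def alignementDansCreature(rangee : list) -> tuple:
--     n = len(rangee)
--
--     nombre_alignements = 0
--     longueur = 0
--     valeur = rangee[0]
--     for bloc in rangee:
--         if valeur == bloc:
--             longueur += 1
--         else:
--             if longueur >= 3 and valeur: nombre_alignements += 1
--             longueur = 1
--             valeur = bloc
--     if longueur >= 3 and valeur:
--         nombre_alignements += 1
--
--     return nombre_alignements
--
-- def scoreRangeeCreature(creature : list, i: int, j : int, dx : int, dy : int) -> int: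
--     def creerRangee(creature : list, i: int, j : int, dx : int, dy : int) -> list:
--         rangee = []
--         largeur = len(creature)
--         hauteur = len(creature[0])
--         x, y = i, j
--         while 0 <= x < largeur and 0 <= y < hauteur:
--             rangee.append(creature[x][y])
--             x += dx
--             y += dy
--         return rangee
--
--     return alignementDansCreature(creerRangee(creature, i, j, dx, dy))
-- ===== SOURCE B (Python) =====
-- def scoreRangeeCreature(creature: list, i: int, j: int, dx: int, dy: int) -> int:
--     largeur = len(creature)
--     hauteur = len(creature[0])
--     rangee = []
--     x, y = i, j
--     while 0 <= x < largeur and 0 <= y < hauteur: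
--         rangee.append(creature[x][y])
--         x += dx
--         y += dy
--
--     if not rangee:
--         # the original raises IndexError on an empty walk (rangee[0]); keep that behaviour
--         raise IndexError("rangee vide")
--
--     def compte(reste: list) -> int:
--         if not reste:
--             return 0
--         v = reste[0]
--         run = 1
--         while run < len(reste) and reste[run] == v:
--             run += 1
--         return (1 if v and run >= 3 else 0) + compte(reste[run:])
--
--     return compte(rangee)
-- ===== Notes on version B (the rewrite author's own statement) =====
-- stated objective: alternative
-- what changed: replaces the single-pass (longueur, valeur) state machine with its trailing final-run fixup by a recursive run-by-run decomposition: each maximal block of equal cells is measured and consumed in one step, scoring it immediately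
import Mathlib
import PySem

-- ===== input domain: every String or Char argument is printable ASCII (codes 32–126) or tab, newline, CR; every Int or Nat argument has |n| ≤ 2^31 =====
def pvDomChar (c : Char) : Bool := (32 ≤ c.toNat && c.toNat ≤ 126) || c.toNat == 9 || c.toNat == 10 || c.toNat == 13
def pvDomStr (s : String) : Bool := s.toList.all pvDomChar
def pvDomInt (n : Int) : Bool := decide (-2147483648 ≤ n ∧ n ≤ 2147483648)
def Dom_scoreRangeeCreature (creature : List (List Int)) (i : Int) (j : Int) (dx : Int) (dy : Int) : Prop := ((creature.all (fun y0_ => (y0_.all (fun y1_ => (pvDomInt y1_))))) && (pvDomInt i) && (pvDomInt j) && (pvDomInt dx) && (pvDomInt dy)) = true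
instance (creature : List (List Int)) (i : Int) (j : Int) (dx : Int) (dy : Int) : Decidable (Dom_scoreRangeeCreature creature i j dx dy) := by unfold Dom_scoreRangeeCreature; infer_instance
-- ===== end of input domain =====

-- B rewrites the run counting as a recursive run-by-run decomposition (score each maximal
-- block of equal cells as it is consumed) instead of A's (longueur, valeur) state machine
-- with a trailing final-run check; same cost, alternative structure.

-- ===== PORT A =====
-- while loop of creerRangee; fuel = largeur + hauteur + 1 is exact whenever ¬(dx = 0 ∧ dy = 0)
-- (then the walk makes at most max(largeur, hauteur) in-window steps); Pre_ guarantees this.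
def creerRangeeLoop (creature : List (List Int)) (largeur hauteur dx dy : Int) :
    Nat → Int → Int → List Int
  | 0, _, _ => []
  | fuel + 1, x, y =>
    if 0 ≤ x ∧ x < largeur ∧ 0 ≤ y ∧ y < hauteur then
      match PySem.List.pyGet? creature x with
      | some row =>
        match PySem.List.pyGet? row y with
        | some v => v :: creerRangeeLoop creature largeur hauteur dx dy fuel (x + dx) (y + dy)
        | none => []  -- Python raises IndexError here (row shorter than hauteur); excluded by Pre_
      | none => []    -- unreachable given 0 ≤ x < largeur
    else []

-- the loop body of alignementDansCreature, state (nombre_alignements, longueur, valeur)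
def pasAlignement (st : Int × Int × Int) (bloc : Int) : Int × Int × Int :=
  if st.2.2 == bloc then (st.1, st.2.1 + 1, st.2.2)
  else ((if st.2.1 ≥ 3 ∧ st.2.2 ≠ 0 then st.1 + 1 else st.1), 1, bloc)

def alignementDansCreature (rangee : List Int) : Int :=
  match PySem.List.pyGet? rangee 0 with
  | none => 0  -- Python raises IndexError on rangee[0]; excluded by Pre_
  | some v0 =>
    let s := rangee.foldl pasAlignement (0, 0, v0)
    if s.2.1 ≥ 3 ∧ s.2.2 ≠ 0 then s.1 + 1 else s.1

def scoreRangeeCreature (creature : List (List Int)) (i : Int) (j : Int) (dx : Int) (dy : Int) : Int :=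
  match PySem.List.pyGet? creature 0 with
  | none => 0  -- Python raises IndexError on creature[0]; excluded by Pre_
  | some row0 =>
    alignementDansCreature
      (creerRangeeLoop creature creature.length row0.length dx dy
        (creature.length + row0.length + 1) i j)

-- ===== PORT B =====
-- run = 1 + length of the prefix of the tail equal to v (the inner while loop of compte)
def runLenTail (v : Int) : List Int → Nat
  | [] => 0
  | b :: t => if b == v then runLenTail v t + 1 else 0

def compteRuns : List Int → Int
  | [] => 0
  | v :: rest =>
    let r := runLenTail v rest
    (if v ≠ 0 ∧ r + 1 ≥ 3 then 1 else 0) + compteRuns (rest.drop r)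
termination_by l => l.length
decreasing_by simp only [List.length_drop, List.length_cons]; omega

def scoreRangeeCreature_alt (creature : List (List Int)) (i : Int) (j : Int) (dx : Int) (dy : Int) : Int :=
  match PySem.List.pyGet? creature 0 with
  | none => 0  -- same guard as len(creature[0]) in B's Python; excluded by Pre_
  | some row0 =>
    let rangee := creerRangeeLoop creature creature.length row0.length dx dy
        (creature.length + row0.length + 1) i j
    if rangee = [] then 0  -- Python B raises IndexError on an empty walk, like A; excluded by Pre_
    else compteRuns rangee

-- ===== PRECONDITION & SPEC =====
-- Pre_ is exactly the set of inputs on which Python A returns: it excludes an empty creature and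
-- an out-of-window start (IndexError on creature[0] resp. rangee[0]), dx = dy = 0 (infinite loop),
-- and a walk that reaches a row shorter than hauteur = len(creature[0]) (IndexError).
def Pre_scoreRangeeCreature (creature : List (List Int)) (i : Int) (j : Int) (dx : Int) (dy : Int) : Prop :=
  creature ≠ [] ∧
  0 ≤ i ∧ i < (creature.length : Int) ∧
  0 ≤ j ∧ j < ((creature.headD []).length : Int) ∧
  ¬(dx = 0 ∧ dy = 0) ∧
  ∀ t ∈ List.range (creature.length + (creature.headD []).length),
    (0 ≤ i + t * dx ∧ i + t * dx < (creature.length : Int) ∧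
     0 ≤ j + t * dy ∧ j + t * dy < ((creature.headD []).length : Int)) →
    j + t * dy < ((((creature.drop (i + t * dx).toNat).headD []).length : Int))

instance (creature : List (List Int)) (i : Int) (j : Int) (dx : Int) (dy : Int) : Decidable (Pre_scoreRangeeCreature creature i j dx dy) := by unfold Pre_scoreRangeeCreature; infer_instance

def pvWitness_scoreRangeeCreature : List (List Int) × Int × Int × Int × Int :=
  ([[1, 1, 1], [0, 2, 0]], 0, 0, 0, 1)

def Spec_scoreRangeeCreature (creature : List (List Int)) (i : Int) (j : Int) (dx : Int) (dy : Int) (out : Int) : Prop := out = scoreRangeeCreature_alt creature i j dx dy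
instance (creature : List (List Int)) (i : Int) (j : Int) (dx : Int) (dy : Int) (out : Int) : Decidable (Spec_scoreRangeeCreature creature i j dx dy out) := by unfold Spec_scoreRangeeCreature; infer_instance

-- ===== CLAIM (what is proved, stated in full; the proofs are below) =====
def Claim_equal_scoreRangeeCreature : Prop := ∀ (creature : List (List Int)) (i : Int) (j : Int) (dx : Int) (dy : Int), Dom_scoreRangeeCreature creature i j dx dy → Pre_scoreRangeeCreature creature i j dx dy → Spec_scoreRangeeCreature creature i j dx dy (scoreRangeeCreature creature i j dx dy)

-- ===== LEMMAS AND PROOFS =====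

-- proof-side name for A's fold followed by the final-run fixup
def finAlign (st : Int × Int × Int) (l : List Int) : Int :=
  let s := l.foldl pasAlignement st
  if s.2.1 ≥ 3 ∧ s.2.2 ≠ 0 then s.1 + 1 else s.1

lemma finAlign_cons (st : Int × Int × Int) (b : Int) (t : List Int) :
    finAlign st (b :: t) = finAlign (pasAlignement st b) t := by
  simp [finAlign]

-- A's fold from an arbitrary run state (nb, lg, v), followed by the final-run fixup, scores the
-- current run once it is finished and then behaves like B's run-by-run recursion.
lemma fold_run (l : List Int) : ∀ (nb lg v : Int),
    finAlign (nb, lg, v) l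
  = nb + (if v ≠ 0 ∧ lg + (runLenTail v l : Int) ≥ 3 then 1 else 0)
       + compteRuns (l.drop (runLenTail v l)) := by
  induction l with
  | nil =>
    intro nb lg v
    simp only [finAlign, List.foldl_nil, runLenTail, Nat.cast_zero, List.drop_nil,
      compteRuns, add_zero]
    by_cases hv : v = 0 <;> by_cases hlg : lg ≥ 3 <;> simp [hv, hlg]
  | cons b t ih =>
    intro nb lg v
    rw [finAlign_cons]
    unfold pasAlignement
    by_cases hvb : v = b
    · subst hvb
      simp only [beq_self_eq_true, if_true]
      rw [ih nb (lg + 1) v]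
      simp only [runLenTail, beq_self_eq_true, if_true, List.drop_succ_cons]
      rw [show lg + 1 + ((runLenTail v t : Int)) = lg + ((runLenTail v t : Int) + 1) from by ring]
      push_cast
      ring_nf
    · have hbeq : (v == b) = false := by simp [hvb]
      simp only [hbeq, Bool.false_eq_true, if_false]
      rw [ih _ 1 b]
      have hne : (b == v) = false := by simp; intro h; exact hvb h.symm
      simp only [runLenTail, hne, Bool.false_eq_true, if_false, Nat.cast_zero, List.drop_zero]
      have hc : compteRuns (b :: t)
          = (if b ≠ 0 ∧ (runLenTail b t : Int) + 1 ≥ 3 then 1 else 0)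
            + compteRuns (t.drop (runLenTail b t)) := by
        rw [compteRuns]
        congr 1
        by_cases h0 : b = 0 <;> by_cases h3 : runLenTail b t + 1 ≥ 3 <;>
          simp [h0, h3] <;> omega
      rw [hc, show (1 : Int) + (runLenTail b t : Int) = (runLenTail b t : Int) + 1 from by ring]
      by_cases hv : v = 0 <;> by_cases hlg : lg ≥ 3 <;> simp [hv, hlg] <;> ring

-- the two counting phases agree on every line
lemma alignement_eq_compte (l : List Int) : alignementDansCreature l = compteRuns l := by
  cases l with
  | nil => simp [alignementDansCreature, compteRuns, PySem.List.pyGet?]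
  | cons h t =>
    have h1 : alignementDansCreature (h :: t) = finAlign (0, 0, h) (h :: t) := by
      simp [alignementDansCreature, PySem.List.pyGet?, PySem.List.pyIdx?]
      rfl
    rw [h1, finAlign_cons]
    have h2 : pasAlignement (0, 0, h) h = (0, 1, h) := by simp [pasAlignement]
    rw [h2, fold_run t 0 1 h, compteRuns]
    rw [show (1 : Int) + (runLenTail h t : Int) = (runLenTail h t : Int) + 1 from by ring]
    simp only [zero_add]
    congr 1
    by_cases h0 : h = 0 <;> by_cases h3 : runLenTail h t + 1 ≥ 3 <;>
      simp [h0, h3] <;> omega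

-- ===== VERDICT (by name: the statement is the Claim_ definition above) =====
theorem scoreRangeeCreature_spec : Claim_equal_scoreRangeeCreature := by
  intro creature i j dx dy _ _
  unfold Spec_scoreRangeeCreature scoreRangeeCreature scoreRangeeCreature_alt
  cases PySem.List.pyGet? creature 0 with
  | none => rfl
  | some row0 =>
    by_cases h : creerRangeeLoop creature creature.length row0.length dx dy
        (creature.length + row0.length + 1) i j = []
    · simp only [h, if_true, alignement_eq_compte, compteRuns]
    · simp only [h, if_false, alignement_eq_compte]
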